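-- pv_equiv track=rewrite | github.com/NicolasBerveglieri/STAGEM2 | tools.py | hp
-- ===== SOURCE A (Python) =====
-- def hp(points,ref_point=[0,0]):
--
--     lw = ref_point[0]
--     lh = ref_point[1]
--     hypervolume = 0
--     for p in points:
--      hypervolume += (lw - p[0]) * (lh - p[1])
--      lh = p[1]
--     return hypervolume
-- ===== SOURCE B (Python) =====
-- def hp(points, ref_point=[0, 0]):
--     # Summation by parts: regroup the telescoping sum by the coefficient of each
--     # height y_i instead of by rectangles.  Each interior y_i contributes
--     # y_i*(x_i - x_{i+1}); the reference height and the last height carry the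
--     # boundary coefficients.
--     pts = list(points)
--     lw = ref_point[0]
--     lh = ref_point[1]
--     if not pts:
--         return 0
--     inner = sum(p[1] * (p[0] - q[0]) for p, q in zip(pts, pts[1:]))
--     return (lw - pts[0][0]) * lh + inner + pts[-1][1] * (pts[-1][0] - lw)
-- ===== Notes on version B (the rewrite author's own statement) =====
-- stated objective: alternative
-- what changed: Replaces A's stateful sweep that threads the previous height lh through a rectangle-area loop with a summation-by-parts regrouping: each height y_i is multiplied once by its net coefficient (x_i - x_{i+1}), plus two boundary terms for the reference height and the last height.
import Mathlib
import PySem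

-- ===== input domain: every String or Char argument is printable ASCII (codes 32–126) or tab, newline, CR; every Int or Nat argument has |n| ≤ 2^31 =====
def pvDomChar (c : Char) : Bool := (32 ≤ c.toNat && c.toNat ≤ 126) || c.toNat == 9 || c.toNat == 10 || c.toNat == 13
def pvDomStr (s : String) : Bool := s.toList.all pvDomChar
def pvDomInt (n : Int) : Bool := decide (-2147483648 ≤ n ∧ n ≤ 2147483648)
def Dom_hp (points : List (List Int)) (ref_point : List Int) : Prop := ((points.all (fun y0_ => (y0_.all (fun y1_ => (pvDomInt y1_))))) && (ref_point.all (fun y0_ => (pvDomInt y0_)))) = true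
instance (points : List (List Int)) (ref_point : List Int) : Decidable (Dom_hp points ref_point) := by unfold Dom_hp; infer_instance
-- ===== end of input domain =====

-- B replaces A's stateful rectangle sweep (threading lh) with a summation-by-parts regrouping:
-- each height multiplied once by its net x-coefficient, plus two boundary terms (objective: alternative).


-- ===== PORT A =====
def hp (points : List (List Int)) (ref_point : List Int) : Int :=
  let lw := PySem.List.pyGetD ref_point 0 0
  let lh := PySem.List.pyGetD ref_point 1 0
  let st := points.foldl
    (fun (st : Int × Int) p =>
      (st.1 + (lw - PySem.List.pyGetD p 0 0) * (st.2 - PySem.List.pyGetD p 1 0),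
       PySem.List.pyGetD p 1 0))
    (0, lh)
  st.1

-- ===== PORT B =====
def hp_alt (points : List (List Int)) (ref_point : List Int) : Int :=
  let pts := points
  let lw := PySem.List.pyGetD ref_point 0 0
  let lh := PySem.List.pyGetD ref_point 1 0
  if pts = [] then 0
  else
    let inner := ((pts.zip (pts.drop 1)).map
      (fun pq => PySem.List.pyGetD pq.1 1 0 *
        (PySem.List.pyGetD pq.1 0 0 - PySem.List.pyGetD pq.2 0 0))).sum
    (lw - PySem.List.pyGetD (PySem.List.pyGetD pts 0 []) 0 0) * lh
      + inner
      + PySem.List.pyGetD (PySem.List.pyGetD pts (-1) []) 1 0 *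
          (PySem.List.pyGetD (PySem.List.pyGetD pts (-1) []) 0 0 - lw)

-- ===== PRECONDITION & SPEC =====
-- Pre_ excludes exactly the inputs where Python A raises IndexError: ref_point or some point shorter than 2.
def Pre_hp (points : List (List Int)) (ref_point : List Int) : Prop :=
  2 ≤ ref_point.length ∧ ∀ p ∈ points, 2 ≤ p.length
instance (points : List (List Int)) (ref_point : List Int) : Decidable (Pre_hp points ref_point) := by unfold Pre_hp; infer_instance
def pvWitness_hp : List (List Int) × List Int := ([[1, 2], [3, 4]], [5, 6])
def Spec_hp (points : List (List Int)) (ref_point : List Int) (out : Int) : Prop := out = hp_alt points ref_point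
instance (points : List (List Int)) (ref_point : List Int) (out : Int) : Decidable (Spec_hp points ref_point out) := by unfold Spec_hp; infer_instance

-- ===== CLAIM (what is proved, stated in full; the proofs are below) =====
def Claim_equal_hp : Prop := ∀ (points : List (List Int)) (ref_point : List Int), Dom_hp points ref_point → Pre_hp points ref_point → Spec_hp points ref_point (hp points ref_point)

-- ===== LEMMAS AND PROOFS =====

-- A's fold, on p :: rest, equals the summation-by-parts regrouping:
-- (lw - x p) * lh + Σ adjacent y_i * (x_i - x_{i+1}) + y_last * (x_last - lw)
theorem hp_fold_parts (lw : Int) :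
    ∀ (rest : List (List Int)) (p : List Int) (lh acc : Int),
      ((p :: rest).foldl
        (fun (st : Int × Int) q =>
          (st.1 + (lw - PySem.List.pyGetD q 0 0) * (st.2 - PySem.List.pyGetD q 1 0),
           PySem.List.pyGetD q 1 0)) (acc, lh)).1
      = acc + (lw - PySem.List.pyGetD p 0 0) * lh
          + (((p :: rest).zip rest).map
              (fun pq => PySem.List.pyGetD pq.1 1 0 *
                (PySem.List.pyGetD pq.1 0 0 - PySem.List.pyGetD pq.2 0 0))).sum
          + PySem.List.pyGetD ((p :: rest).getLast (by simp)) 1 0 *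
              (PySem.List.pyGetD ((p :: rest).getLast (by simp)) 0 0 - lw) := by
  intro rest
  induction rest with
  | nil =>
    intro p lh acc
    simp [List.foldl]
    ring
  | cons q rs ih =>
    intro p lh acc
    simp only [List.foldl_cons, List.zip_cons_cons, List.map_cons, List.sum_cons]
    have := ih q (PySem.List.pyGetD p 1 0)
      (acc + (lw - PySem.List.pyGetD p 0 0) * (lh - PySem.List.pyGetD p 1 0))
    simp only [List.foldl_cons] at this
    rw [this]
    rw [List.getLast_cons (by simp : q :: rs ≠ [])]
    ring

-- ===== VERDICT (by name: the statement is the Claim_ definition above) =====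
theorem hp_spec : Claim_equal_hp := by
  intro points ref_point _ _
  unfold Spec_hp hp hp_alt
  cases points with
  | nil => simp
  | cons p rest =>
    simp only [if_neg (by simp : ¬(p :: rest = []))]
    rw [hp_fold_parts (PySem.List.pyGetD ref_point 0 0) rest p (PySem.List.pyGetD ref_point 1 0) 0]
    rw [PySem.List.pyGetD_neg_one (xs := p :: rest) (h := by simp)]
    simp [PySem.List.pyGetD_zero_cons]
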